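-- pv_equiv track=rewrite | github.com/hyunji-ok/CODING-TEST-OLD | programmers/python3/level1/모의고사.py | solution
-- ===== SOURCE A (Python) =====
-- def solution(answers):
--     answer = []
--
--     count1 = 0
--     count2 = 0
--     count3 = 0
--
--     num1 = [1,2,3,4,5]
--     num2 = [2,1,2,3,2,4,2,5]
--     num3 = [3,3,1,1,2,2,4,4,5,5]
--
--     for i in range(len(answers)):
--         if answers[i] == num1[i%len(num1)]:
--             count1+=1
--         if answers[i] == num2[i%len(num2)]:
--             count2+=1
--         if answers[i] == num3[i%len(num3)]:
--             count3+=1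
--
--     answer_temp = [count1, count2, count3]
--
--     for person, score in enumerate(answer_temp):
--         if score == max(answer_temp):
--             answer.append(person+1)
--
--     return answer
-- ===== SOURCE B (Python) =====
-- def solution(answers):
--     # Phase-histogram algorithm: the three guess patterns repeat with period
--     # lcm(5,8,10) = 40, so one pass buckets answers by (position mod 40, value);
--     # each score is then a fixed 40-term table lookup sum, no per-pattern scan.
--     patterns = [[1, 2, 3, 4, 5],
--                 [2, 1, 2, 3, 2, 4, 2, 5],
--                 [3, 3, 1, 1, 2, 2, 4, 4, 5, 5]]
--     hist = {}
--     for i, a in enumerate(answers):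
--         k = (i % 40, a)
--         hist[k] = hist.get(k, 0) + 1
--     scores = [sum(hist.get((r, p[r % len(p)]), 0) for r in range(40)) for p in patterns]
--     best = max(scores)
--     return [k + 1 for k, s in enumerate(scores) if s == best]
-- ===== Notes on version B (the rewrite author's own statement) =====
-- stated objective: alternative
-- what changed: Replaces A's fused per-element pattern-comparison loop by a phase-histogram algorithm: one pass buckets answers into a dict keyed by (index mod 40, value) -- 40 = lcm of the three pattern periods -- and each score is a fixed 40-term lookup sum over that table; winners are then selected by a comprehension over the score list.
import Mathlib
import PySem

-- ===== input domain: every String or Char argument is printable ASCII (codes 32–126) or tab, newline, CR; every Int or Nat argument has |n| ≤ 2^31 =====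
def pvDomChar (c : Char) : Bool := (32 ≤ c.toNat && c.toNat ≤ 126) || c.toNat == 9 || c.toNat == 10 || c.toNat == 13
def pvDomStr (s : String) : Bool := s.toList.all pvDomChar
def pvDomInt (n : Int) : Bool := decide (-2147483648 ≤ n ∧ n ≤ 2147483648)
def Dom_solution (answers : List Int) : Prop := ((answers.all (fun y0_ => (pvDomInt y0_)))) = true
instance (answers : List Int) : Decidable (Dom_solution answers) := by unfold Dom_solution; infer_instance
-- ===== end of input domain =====

-- B replaces A's fused per-element pattern-comparison loop by a phase-histogram algorithm:
-- one pass buckets answers by (index mod 40, value) — 40 = lcm of the pattern periods —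
-- and each score is a 40-term lookup sum over that table (objective: alternative).

-- ===== PORT A =====
def solution (answers : List Int) : List Int :=
  let num1 : List Int := [1,2,3,4,5]
  let num2 : List Int := [2,1,2,3,2,4,2,5]
  let num3 : List Int := [3,3,1,1,2,2,4,4,5,5]
  -- indices from range(len(answers)) are always in range, so pyGetD's default is never used
  let c := (PySem.List.pyRange 0 (answers.length : Int) 1).foldl
    (fun (c : Int × Int × Int) i =>
      (if PySem.List.pyGetD answers i 0 = PySem.List.pyGetD num1 (PySem.Int.mod i (num1.length : Int)) 0 then c.1 + 1 else c.1,
       if PySem.List.pyGetD answers i 0 = PySem.List.pyGetD num2 (PySem.Int.mod i (num2.length : Int)) 0 then c.2.1 + 1 else c.2.1,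
       if PySem.List.pyGetD answers i 0 = PySem.List.pyGetD num3 (PySem.Int.mod i (num3.length : Int)) 0 then c.2.2 + 1 else c.2.2))
    ((0 : Int), (0 : Int), (0 : Int))
  let answer_temp : List Int := [c.1, c.2.1, c.2.2]
  (PySem.List.enumerate answer_temp).foldl
    (fun acc ps => if ps.2 = (PySem.List.max? answer_temp (fun y => y)).getD 0 then acc ++ [ps.1 + 1] else acc) []

-- ===== PORT B =====
def solution_alt (answers : List Int) : List Int :=
  let patterns : List (List Int) := [[1,2,3,4,5], [2,1,2,3,2,4,2,5], [3,3,1,1,2,2,4,4,5,5]]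
  -- hist[k] = hist.get(k, 0) + 1 over k = (i % 40, a)
  let hist : PySem.Dict (Int × Int) Int := (PySem.List.enumerate answers).foldl
    (fun d ia => d.insert (PySem.Int.mod ia.1 40, ia.2) (d.getD (PySem.Int.mod ia.1 40, ia.2) 0 + 1))
    PySem.Dict.empty
  let scores := patterns.map (fun p =>
    ((PySem.List.pyRange 0 40 1).map
      (fun r => hist.getD (r, PySem.List.pyGetD p (PySem.Int.mod r (p.length : Int)) 0) 0)).sum)
  let best := (PySem.List.max? scores (fun y => y)).getD 0
  ((PySem.List.enumerate scores).filter (fun is => is.2 = best)).map (fun is => is.1 + 1)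

-- ===== PRECONDITION & SPEC =====
def Spec_solution (answers : List Int) (out : List Int) : Prop := out = solution_alt answers
instance (answers : List Int) (out : List Int) : Decidable (Spec_solution answers out) := by unfold Spec_solution; infer_instance

-- ===== CLAIM (what is proved, stated in full; the proofs are below) =====
def Claim_equal_solution : Prop := ∀ (answers : List Int), Dom_solution answers → Spec_solution answers (solution answers)

-- ===== LEMMAS AND PROOFS =====

-- proof-side intermediate: the matching-position count for one pattern
def pvScore (answers p : List Int) : Int :=
  ((PySem.List.enumerate answers).map
    (fun ia => if ia.2 = PySem.List.pyGetD p (PySem.Int.mod ia.1 (p.length : Int)) 0 then (1 : Int) else 0)).sum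

theorem pvScore_eq_countP (answers p : List Int) :
    pvScore answers p =
      (((PySem.List.enumerate answers).countP
        (fun ia => decide (ia.2 = PySem.List.pyGetD p (PySem.Int.mod ia.1 (p.length : Int)) 0))) : Int) := by
  unfold pvScore
  rw [show (fun ia : Int × Int => if ia.2 = PySem.List.pyGetD p (PySem.Int.mod ia.1 (p.length : Int)) 0 then (1 : Int) else 0)
      = (fun ia : Int × Int => if (decide (ia.2 = PySem.List.pyGetD p (PySem.Int.mod ia.1 (p.length : Int)) 0)) = true then (1 : Int) else 0)
      from by funext ia; simp]
  exact PySem.List.sum_map_ite_one_zero _ _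

-- a sum over a nodup list of a function vanishing off m is its value at m
theorem sum_map_single (R : List Int) (m : Int) (f : Int → Int)
    (hnd : R.Nodup) (hm : m ∈ R) (h0 : ∀ r ∈ R, r ≠ m → f r = 0) :
    (R.map f).sum = f m := by
  induction R with
  | nil => cases hm
  | cons a R ih =>
    rcases List.mem_cons.mp hm with h | h
    · subst h
      have hz : ∀ x ∈ R.map f, x = 0 := by
        intro x hx
        rcases List.mem_map.mp hx with ⟨r, hr, rfl⟩
        exact h0 r (List.mem_cons_of_mem _ hr) (fun he => (List.nodup_cons.mp hnd).1 (he ▸ hr))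
      simp [List.sum_eq_zero hz]
    · have ha : f a = 0 := h0 a (List.mem_cons_self) (fun he => (List.nodup_cons.mp hnd).1 (he ▸ h))
      simp [ha, ih (List.nodup_cons.mp hnd).2 h (fun r hr => h0 r (List.mem_cons_of_mem _ hr))]

theorem sum_map_ite_pair (v : Int → Int) (m w : Int) (hm0 : 0 ≤ m) (hm : m < 40) :
    ((PySem.List.pyRange 0 40 1).map (fun r => if (m, w) = (r, v r) then (1 : Int) else 0)).sum
      = if w = v m then 1 else 0 := by
  rw [sum_map_single (PySem.List.pyRange 0 40 1) m _
      (PySem.List.nodup_pyRange_one 0 40)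
      ((PySem.List.mem_pyRange_one).mpr ⟨hm0, hm⟩)
      (by intro r _ hr; simp [Prod.ext_iff, Ne.symm hr])]
  simp [Prod.ext_iff]

-- one histogram pass grouped by (index mod 40, value) counts exactly the matches
theorem sum_count_mod (L : List (Int × Int)) (v : Int → Int) :
    ((PySem.List.pyRange 0 40 1).map
      (fun r => ((L.map (fun ia => (PySem.Int.mod ia.1 40, ia.2))).count (r, v r) : Int))).sum
    = ((L.countP (fun ia => decide (ia.2 = v (PySem.Int.mod ia.1 40)))) : Int) := by
  induction L with
  | nil => simp
  | cons x L ih =>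
    have hstep : (fun r => (((x :: L).map (fun ia => (PySem.Int.mod ia.1 40, ia.2))).count (r, v r) : Int))
        = fun r => ((L.map (fun ia => (PySem.Int.mod ia.1 40, ia.2))).count (r, v r) : Int)
            + (if (PySem.Int.mod x.1 40, x.2) = (r, v r) then 1 else 0) := by
      funext r
      rw [List.map_cons, List.count_cons]
      push_cast
      congr 1
      simp [beq_iff_eq]
    rw [hstep, PySem.List.sum_map_add_int, ih,
        sum_map_ite_pair v (PySem.Int.mod x.1 40) x.2
          (PySem.Int.mod_nonneg x.1 (by norm_num)) (PySem.Int.mod_lt x.1 (by norm_num))]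
    rw [List.countP_cons]
    push_cast
    simp

theorem mod_mod_collapse (j b : Int) (hb : 0 < b) (hdvd : b ∣ 40) :
    PySem.Int.mod (PySem.Int.mod j 40) b = PySem.Int.mod j b := by
  rw [PySem.Int.mod_eq_emod_of_pos hb, PySem.Int.mod_eq_emod_of_pos hb,
      PySem.Int.mod_eq_emod_of_pos (show (0:Int) < 40 by norm_num)]
  exact Int.emod_emod_of_dvd j hdvd

-- the histogram's entry at k is the number of elements mapping to bucket k
theorem getD_hist (L : List (Int × Int)) (d : PySem.Dict (Int × Int) Int) (k : Int × Int) :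
    (L.foldl (fun d ia => d.insert (PySem.Int.mod ia.1 40, ia.2) (d.getD (PySem.Int.mod ia.1 40, ia.2) 0 + 1)) d).getD k 0
    = d.getD k 0 + ((L.map (fun ia => (PySem.Int.mod ia.1 40, ia.2))).count k : Int) := by
  induction L generalizing d with
  | nil => simp
  | cons x L ih =>
    simp only [List.foldl_cons, List.map_cons, List.count_cons]
    rw [ih, PySem.Dict.getD_insert]
    simp only [beq_iff_eq]
    by_cases h : k = (PySem.Int.mod x.1 40, x.2)
    · rw [if_pos h, if_pos h.symm, h]
      push_cast
      ring
    · rw [if_neg h, if_neg (fun he => h (Eq.symm he))]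
      push_cast
      ring

-- B's histogram score equals the direct matching count for each pattern
theorem bscore_eq (answers p : List Int) (hb : 0 < (p.length : Int)) (hdvd : (p.length : Int) ∣ 40) :
    ((PySem.List.pyRange 0 40 1).map
      (fun r => ((PySem.List.enumerate answers).foldl
          (fun d ia => d.insert (PySem.Int.mod ia.1 40, ia.2) (d.getD (PySem.Int.mod ia.1 40, ia.2) 0 + 1))
          PySem.Dict.empty).getD (r, PySem.List.pyGetD p (PySem.Int.mod r (p.length : Int)) 0) 0)).sum
    = pvScore answers p := by
  have hget : ∀ k : Int × Int,
      ((PySem.List.enumerate answers).foldl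
        (fun d ia => d.insert (PySem.Int.mod ia.1 40, ia.2) (d.getD (PySem.Int.mod ia.1 40, ia.2) 0 + 1))
        PySem.Dict.empty).getD k 0
      = (((PySem.List.enumerate answers).map (fun ia => (PySem.Int.mod ia.1 40, ia.2))).count k : Int) := by
    intro k
    rw [getD_hist]
    simp
  simp only [hget]
  rw [sum_count_mod (PySem.List.enumerate answers)
        (fun r => PySem.List.pyGetD p (PySem.Int.mod r (p.length : Int)) 0)]
  have hcoll : (fun ia : Int × Int =>
        decide (ia.2 = PySem.List.pyGetD p (PySem.Int.mod (PySem.Int.mod ia.1 40) (p.length : Int)) 0))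
      = (fun ia : Int × Int =>
        decide (ia.2 = PySem.List.pyGetD p (PySem.Int.mod ia.1 (p.length : Int)) 0)) := by
    funext ia
    rw [mod_mod_collapse ia.1 (p.length : Int) hb hdvd]
  rw [hcoll, ← pvScore_eq_countP]

-- A's fused triple-counter loop computes the three per-pattern scores
theorem counts_eq (answers : List Int) :
    (PySem.List.pyRange 0 (answers.length : Int) 1).foldl
      (fun (c : Int × Int × Int) i =>
        (if PySem.List.pyGetD answers i 0 = PySem.List.pyGetD ([1,2,3,4,5] : List Int) (PySem.Int.mod i (([1,2,3,4,5] : List Int).length : Int)) 0 then c.1 + 1 else c.1,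
         if PySem.List.pyGetD answers i 0 = PySem.List.pyGetD ([2,1,2,3,2,4,2,5] : List Int) (PySem.Int.mod i (([2,1,2,3,2,4,2,5] : List Int).length : Int)) 0 then c.2.1 + 1 else c.2.1,
         if PySem.List.pyGetD answers i 0 = PySem.List.pyGetD ([3,3,1,1,2,2,4,4,5,5] : List Int) (PySem.Int.mod i (([3,3,1,1,2,2,4,4,5,5] : List Int).length : Int)) 0 then c.2.2 + 1 else c.2.2))
      ((0 : Int), (0 : Int), (0 : Int)) =
    (pvScore answers [1,2,3,4,5], pvScore answers [2,1,2,3,2,4,2,5], pvScore answers [3,3,1,1,2,2,4,4,5,5]) := by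
  rw [PySem.List.foldl_prod_mk
        (f := fun (a : Int) (i : Int) => if PySem.List.pyGetD answers i 0 = PySem.List.pyGetD ([1,2,3,4,5] : List Int) (PySem.Int.mod i (([1,2,3,4,5] : List Int).length : Int)) 0 then a + 1 else a)
        (g := fun (c : Int × Int) (i : Int) =>
          (if PySem.List.pyGetD answers i 0 = PySem.List.pyGetD ([2,1,2,3,2,4,2,5] : List Int) (PySem.Int.mod i (([2,1,2,3,2,4,2,5] : List Int).length : Int)) 0 then c.1 + 1 else c.1,
           if PySem.List.pyGetD answers i 0 = PySem.List.pyGetD ([3,3,1,1,2,2,4,4,5,5] : List Int) (PySem.Int.mod i (([3,3,1,1,2,2,4,4,5,5] : List Int).length : Int)) 0 then c.2 + 1 else c.2))]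
  rw [PySem.List.foldl_prod_mk
        (f := fun (a : Int) (i : Int) => if PySem.List.pyGetD answers i 0 = PySem.List.pyGetD ([2,1,2,3,2,4,2,5] : List Int) (PySem.Int.mod i (([2,1,2,3,2,4,2,5] : List Int).length : Int)) 0 then a + 1 else a)
        (g := fun (a : Int) (i : Int) => if PySem.List.pyGetD answers i 0 = PySem.List.pyGetD ([3,3,1,1,2,2,4,4,5,5] : List Int) (PySem.Int.mod i (([3,3,1,1,2,2,4,4,5,5] : List Int).length : Int)) 0 then a + 1 else a)]
  rw [PySem.List.foldl_ite_add_one, PySem.List.foldl_ite_add_one, PySem.List.foldl_ite_add_one]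
  have hb : ∀ p : List Int, pvScore answers p =
      (((PySem.List.pyRange 0 (answers.length : Int) 1).countP
        (fun i => decide (PySem.List.pyGetD answers i 0 = PySem.List.pyGetD p (PySem.Int.mod i (p.length : Int)) 0))) : Int) := by
    intro p
    rw [pvScore_eq_countP, PySem.List.enumerate_eq_map_pyRange (d := 0), List.countP_map]
    rfl
  rw [hb, hb, hb]
  simp

-- A's append loop is B's filter-map comprehension, once the scores agree
theorem select_eq (s1 s2 s3 : Int) :
    (PySem.List.enumerate ([s1, s2, s3] : List Int)).foldl
      (fun acc ps => if ps.2 = (PySem.List.max? ([s1, s2, s3] : List Int) (fun y => y)).getD 0 then acc ++ [ps.1 + 1] else acc) [] =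
    ((PySem.List.enumerate ([s1, s2, s3] : List Int)).filter
      (fun is => is.2 = (PySem.List.max? ([s1, s2, s3] : List Int) (fun y => y)).getD 0)).map (fun is => is.1 + 1) := by
  have h := PySem.List.foldl_append_if
    (l := PySem.List.enumerate ([s1, s2, s3] : List Int)) (acc := ([] : List Int))
    (p := fun ps : Int × Int => decide (ps.2 = (PySem.List.max? ([s1, s2, s3] : List Int) (fun y => y)).getD 0))
    (f := fun ps : Int × Int => ps.1 + 1)
  simp only [decide_eq_true_eq] at h
  rw [h]
  simp

-- ===== VERDICT (by name: the statement is the Claim_ definition above) =====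
theorem solution_spec : Claim_equal_solution := by
  intro answers _
  unfold Spec_solution solution solution_alt
  simp only [List.map_cons, List.map_nil]
  rw [counts_eq answers]
  simp only [bscore_eq answers [1,2,3,4,5] (by norm_num) (by norm_num),
      bscore_eq answers [2,1,2,3,2,4,2,5] (by norm_num) (by norm_num),
      bscore_eq answers [3,3,1,1,2,2,4,4,5,5] (by norm_num) (by norm_num)]
  exact select_eq _ _ _
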